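-- pv_equiv track=rewrite | github.com/quoth-le-corbeau/gr1dl0ck | converters.py | custom_b64_to_hex
-- ===== SOURCE A (Python) =====
-- _BASE_16 = 16
--
-- _BASE_64_BINARY_CHUNK_LENGTH = 6
--
-- _BYTE_LENGTH = 8
--
-- _BASE64_LOOK_UP_STRING = (
--     "ABCDEFGHIJKLMNOPQRSTUVWXYZabcdefghijklmnopqrstuvwxyz0123456789+/"
-- )
--
-- def custom_b64_to_hex(b64_string: str) -> str:
--     """
--     step_0: remove b64 padding
--     step_1: group data into 6-bit chunks.
--         Note: you get a string that may not be a perfect multiple of 8 bits!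
--     step_2: group binary string into 8-bit segments.
--         Note: If the binary string is padded, can lead to unnecessary trailing zeroes when converted to hex.
--     step_3: trim excess bits that are not full byte (8-bits)
--
--     :param b64_string:
--     :return: converted to hex string
--     """
--     b64_string = b64_string.rstrip("=")
--     binary_string = "".join(
--         bin(_BASE64_LOOK_UP_STRING.index(c))[2:].zfill(_BASE_64_BINARY_CHUNK_LENGTH)
--         for c in b64_string
--     )
--     excess_bits = len(binary_string) % _BYTE_LENGTH
--     if excess_bits:
--         binary_string = binary_string[:-excess_bits]
--     hex_string = "".join(
--         custom_hex(int(binary_string[i : i + _BYTE_LENGTH], 2))[2:].zfill(2)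
--         for i in range(0, len(binary_string), _BYTE_LENGTH)
--     )
--     return hex_string
--
-- def custom_hex(n: int) -> str:
--     """
--     Convert an integer to a hexadecimal string (mimicking Python's built-in hex() function).
--
--     Steps:
--     step_0: Handle edge case where n is 0 (return '0x0').
--     step_1: Determine if the number is negative.
--     step_2: Convert the absolute value of the number to hexadecimal.
--     step_3: If negative, prepend '-0x', otherwise prepend '0x'.
--
--     :param n: Integer to be converted to hex.
--     :return: Hexadecimal string representation.
--     """
--     if n == 0:
--         return "0x0"
--     hex_chars = "0123456789abcdef"
--     is_negative = n < 0
--     n = abs(n)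
--     hex_result = ""
--     while n > 0:
--         remainder = n % _BASE_16
--         hex_result = hex_chars[remainder] + hex_result
--         n //= _BASE_16
--     return "-0x" + hex_result if is_negative else "0x" + hex_result
-- ===== SOURCE B (Python) =====
-- _BASE64_LOOK_UP_STRING = (
--     "ABCDEFGHIJKLMNOPQRSTUVWXYZabcdefghijklmnopqrstuvwxyz0123456789+/"
-- )
--
--
-- def custom_b64_to_hex(b64_string: str) -> str:
--     """Streaming bit-accumulator: emit bytes as they complete, no binary string."""
--     acc = 0
--     bits = 0
--     out = []
--     for c in b64_string.rstrip("="):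
--         acc = (acc << 6) | _BASE64_LOOK_UP_STRING.index(c)
--         bits += 6
--         if bits >= 8:
--             bits -= 8
--             out.append(format((acc >> bits) & 0xFF, "02x"))
--             acc &= (1 << bits) - 1
--     return "".join(out)
-- ===== Notes on version B (the rewrite author's own statement) =====
-- stated objective: simpler
-- what changed: B keeps a streaming integer bit-accumulator (masked to the pending bits) and emits each byte as it completes, instead of building a whole intermediate binary-digit string, trimming it, and re-parsing it in 8-character slices through a hand-written hex() mimic.
import Mathlib
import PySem

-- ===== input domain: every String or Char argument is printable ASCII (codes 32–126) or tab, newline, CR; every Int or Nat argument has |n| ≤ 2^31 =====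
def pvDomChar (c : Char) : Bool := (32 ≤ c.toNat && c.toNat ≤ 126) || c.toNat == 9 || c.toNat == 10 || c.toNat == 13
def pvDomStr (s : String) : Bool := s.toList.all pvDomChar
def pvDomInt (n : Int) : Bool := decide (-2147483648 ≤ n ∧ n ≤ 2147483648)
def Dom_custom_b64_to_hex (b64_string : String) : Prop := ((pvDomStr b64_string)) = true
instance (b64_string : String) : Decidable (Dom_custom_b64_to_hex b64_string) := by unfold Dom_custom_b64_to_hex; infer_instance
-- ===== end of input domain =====

-- B replaces A's intermediate binary-digit string (built, trimmed, then re-parsed in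
-- 8-char slices through a hand-written hex() mimic) with a streaming integer bit-accumulator.

-- ===== PORT A =====
-- shared module constant _BASE64_LOOK_UP_STRING
def pvLut : List Char := "ABCDEFGHIJKLMNOPQRSTUVWXYZabcdefghijklmnopqrstuvwxyz0123456789+/".toList

-- _BASE64_LOOK_UP_STRING.index(c); Python raises ValueError when c is absent — those inputs
-- are excluded by Pre_; the .getD 0 default is never reached inside Pre_.
def pvIdx (c : Char) : Nat := (PySem.List.index? pvLut c).getD 0

-- b64_string.rstrip("="): exact hand port (drop trailing '=' characters)
def pvRstripEq (cs : List Char) : List Char := (cs.reverse.dropWhile (fun c => c == '=')).reverse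

def pvHexChars : List Char := "0123456789abcdef".toList

-- the 'while n > 0' loop of custom_hex; fuel makes it structural, fuel = initial n suffices
def pvHexLoop : Nat → Nat → List Char → List Char
  | 0, _, acc => acc
  | fuel+1, n, acc =>
    if n = 0 then acc
    else pvHexLoop fuel (n / 16) (pvHexChars.getD (n % 16) ' ' :: acc)

-- helper custom_hex of A's module, transliterated (at the List Char level)
def custom_hex (n : Int) : List Char :=
  if n = 0 then "0x0".toList
  else
    let res := pvHexLoop n.natAbs n.natAbs []
    if n < 0 then "-0x".toList ++ res else "0x".toList ++ res

-- int(chunk, 2): the chunks here are nonempty binary-digit strings, so the ValueError path (none)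
-- is never reached; .getD 0 only totalizes it
def custom_b64_to_hex (b64_string : String) : String :=
  let stripped := pvRstripEq b64_string.toList
  let binary := PySem.Chars.join [] (stripped.map (fun c =>
    PySem.Chars.zfill (PySem.Chars.slice (PySem.Int.pyBin (pvIdx c : Int)).toList (some 2) none) 6))
  let excess : Int := PySem.Int.mod (PySem.List.len binary) 8
  let binary2 := if excess ≠ 0 then PySem.Chars.slice binary none (some (-excess)) else binary
  let hex := PySem.Chars.join [] ((PySem.List.pyRange 0 (PySem.List.len binary2) 8).map (fun i =>
    PySem.Chars.zfill (PySem.Chars.slice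
      (custom_hex ((PySem.Int.ofCharsBase? (PySem.Chars.slice binary2 (some i) (some (i+8))) 2).getD 0))
      (some 2) none) 2))
  String.ofList hex

-- ===== PORT B =====
-- format(b, '02x'): exact for the bytes produced here (0 ≤ b < 256)
def pvHex2 (b : Nat) : List Char := [pvHexChars.getD (b / 16) ' ', pvHexChars.getD (b % 16) ' ']

-- loop body of B: state = (acc, bits, out)
def pvBStep (st : Nat × Nat × List (List Char)) (c : Char) : Nat × Nat × List (List Char) :=
  let acc := (st.1 <<< 6) ||| pvIdx c
  let bits := st.2.1 + 6
  if 8 ≤ bits then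
    (acc &&& ((1 <<< (bits - 8)) - 1), bits - 8,
      st.2.2 ++ [pvHex2 ((acc >>> (bits - 8)) &&& 255)])
  else (acc, bits, st.2.2)

def custom_b64_to_hex_alt (b64_string : String) : String :=
  let st := (pvRstripEq b64_string.toList).foldl pvBStep (0, 0, [])
  String.ofList (PySem.Chars.join [] st.2.2)

-- ===== PRECONDITION & SPEC =====
-- Pre_ excludes exactly the inputs on which Python A raises ValueError: a character (other
-- than stripped trailing padding) that is not in the base64 alphabet; B's Python raises there too.
def Pre_custom_b64_to_hex (b64_string : String) : Prop :=
  (pvRstripEq b64_string.toList).all (fun c => pvLut.contains c) = true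
instance (b64_string : String) : Decidable (Pre_custom_b64_to_hex b64_string) := by
  unfold Pre_custom_b64_to_hex; infer_instance
def pvWitness_custom_b64_to_hex : String := "TWFu"

def Spec_custom_b64_to_hex (b64_string : String) (out : String) : Prop := out = custom_b64_to_hex_alt b64_string
instance (b64_string : String) (out : String) : Decidable (Spec_custom_b64_to_hex b64_string out) := by unfold Spec_custom_b64_to_hex; infer_instance

-- ===== CLAIM (what is proved, stated in full; the proofs are below) =====
def Claim_equal_custom_b64_to_hex : Prop := ∀ (b64_string : String), Dom_custom_b64_to_hex b64_string → Pre_custom_b64_to_hex b64_string → Spec_custom_b64_to_hex b64_string (custom_b64_to_hex b64_string)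

-- ===== LEMMAS AND PROOFS =====

-- bit-level vocabulary used only by the proofs
def bitChar (d : Nat) : Char := if d = 1 then '1' else '0'
def bits6 (v : Nat) : List Nat := [v/32%2, v/16%2, v/8%2, v/4%2, v/2%2, v%2]
def bits8 (v : Nat) : List Nat := [v/128%2, v/64%2, v/32%2, v/16%2, v/8%2, v/4%2, v/2%2, v%2]
def pvBits (cs : List Char) : List Nat := cs.flatMap (fun c => bits6 (pvIdx c))
def pvTrunc {α : Type} (t : List α) : List α := t.take (t.length - t.length % 8)

def pvChunks {α : Type} : List α → List (List α)
  | [] => []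
  | x :: xs => ((x :: xs).take 8) :: pvChunks ((x :: xs).drop 8)
  termination_by l => l.length
  decreasing_by simp

def pvHexify (ds : List Nat) : List Char :=
  PySem.Chars.zfill (PySem.Chars.slice
    (custom_hex ((PySem.Int.ofCharsBase? (ds.map bitChar) 2).getD 0)) (some 2) none) 2

def pvAspec : List Char → List (List Char)
  | a :: b :: c :: d :: rest =>
      pvHex2 (4*(pvIdx a) + (pvIdx b)/16) :: pvHex2 (((pvIdx b)%16)*16 + (pvIdx c)/4)
        :: pvHex2 (((pvIdx c)%4)*64 + pvIdx d) :: pvAspec rest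
  | [] => []
  | [_] => []
  | [a, b] => [pvHex2 (4*(pvIdx a) + (pvIdx b)/16)]
  | [a, b, c] => [pvHex2 (4*(pvIdx a) + (pvIdx b)/16), pvHex2 (((pvIdx b)%16)*16 + (pvIdx c)/4)]

theorem pvChunks_nil {α : Type} : pvChunks ([] : List α) = [] := by rw [pvChunks]

theorem pvIdx_lt (c : Char) : pvIdx c < 64 := by
  unfold pvIdx PySem.List.index?
  cases h : List.idxOf? c pvLut with
  | none => simp
  | some n =>
    obtain ⟨h1, -⟩ := List.idxOf?_eq_some_iff.mp h
    simpa using h1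

set_option maxRecDepth 10000 in
theorem pv_chunk6 (v : Nat) (hv : v < 64) :
    PySem.Chars.zfill (PySem.Chars.slice (PySem.Int.pyBin (v : Int)).toList (some 2) none) 6
      = (bits6 v).map bitChar := by
  have h : ∀ w : Fin 64,
      PySem.Chars.zfill (PySem.Chars.slice (PySem.Int.pyBin ((w : Nat) : Int)).toList (some 2) none) 6
        = (bits6 (w : Nat)).map bitChar := by decide
  exact h ⟨v, hv⟩

set_option maxRecDepth 10000 in
set_option maxHeartbeats 1000000 in
theorem pv_parse8 (b : Nat) (hb : b < 256) :
    PySem.Int.ofCharsBase? ((bits8 b).map bitChar) 2 = some (b : Int) := by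
  have h : ∀ w : Fin 256,
      PySem.Int.ofCharsBase? ((bits8 (w : Nat)).map bitChar) 2 = some ((w : Nat) : Int) := by decide
  exact h ⟨b, hb⟩

set_option maxRecDepth 10000 in
set_option maxHeartbeats 1000000 in
theorem pv_hex2eq (b : Nat) (hb : b < 256) :
    PySem.Chars.zfill (PySem.Chars.slice (custom_hex (b : Int)) (some 2) none) 2 = pvHex2 b := by
  have h : ∀ w : Fin 256,
      PySem.Chars.zfill (PySem.Chars.slice (custom_hex ((w : Nat) : Int)) (some 2) none) 2
        = pvHex2 (w : Nat) := by decide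
  exact h ⟨b, hb⟩

theorem pvHexify_bits8 (b : Nat) (hb : b < 256) : pvHexify (bits8 b) = pvHex2 b := by
  unfold pvHexify
  rw [pv_parse8 b hb]
  exact pv_hex2eq b hb

theorem join_nil_flatten (l : List (List Char)) : PySem.Chars.join [] l = l.flatten := by
  unfold PySem.Chars.join List.intercalate
  induction l with
  | nil => rfl
  | cons x xs ih => cases xs <;> simp_all [List.intersperse]

theorem pv_binary_eq (cs : List Char) :
    PySem.Chars.join [] (cs.map (fun c =>
      PySem.Chars.zfill (PySem.Chars.slice (PySem.Int.pyBin (pvIdx c : Int)).toList (some 2) none) 6))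
    = (pvBits cs).map bitChar := by
  simp only [join_nil_flatten, pvBits, List.flatMap_def, List.map_flatten, List.map_map]
  refine congrArg List.flatten (List.map_congr_left ?_)
  intro c _
  exact pv_chunk6 (pvIdx c) (pvIdx_lt c)

theorem pv_range_chunks_aux {α : Type} (q : Nat) (t : List α) (ht : t.length = 8 * q) :
    (List.range q).map (fun k => (t.drop (8*k)).take 8) = pvChunks t := by
  induction q generalizing t with
  | zero =>
    have : t = [] := List.eq_nil_of_length_eq_zero (by omega)
    subst this; rw [pvChunks]; rfl
  | succ q ih =>
    rw [List.range_succ_eq_map]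
    cases t with
    | nil => simp at ht
    | cons x xs =>
      rw [pvChunks]
      simp only [List.map_cons, List.map_map]
      congr 1
      show _ = pvChunks ((x::xs).drop 8)
      rw [← ih ((x::xs).drop 8) (by simp at ht ⊢; omega)]
      apply List.map_congr_left
      intro k _
      simp only [Function.comp_apply, List.drop_drop]
      congr 2
      omega

theorem pv_range_chunks {α : Type} (q : Nat) (t : List α) (ht : t.length = 8 * q) :
    (PySem.List.pyRange 0 (PySem.List.len t) 8).map
        (fun i => PySem.List.slice t (some i) (some (i+8)))
      = pvChunks t := by
  rw [show PySem.List.len t = ((8*q : Nat) : Int) by simp [ht]]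
  rw [PySem.List.pyRange_of_pos 0 ((8*q:Nat):Int) (by norm_num : (0:Int) < 8)]
  have hcount : (if (0:Int) < ((8*q:Nat):Int) then ((((8*q:Nat):Int) - 0 + 8 - 1) / 8).toNat else 0) = q := by
    split <;> omega
  rw [hcount, ← pv_range_chunks_aux q t ht, List.map_map]
  apply List.map_congr_left
  intro k hk
  simp only [Function.comp_apply]
  rw [show (0:Int) + 8 * (k : Int) = ((8*k : Nat) : Int) by push_cast; ring]
  rw [show ((8*k:Nat):Int) + 8 = ((8*k+8 : Nat):Int) by push_cast; ring]
  rw [PySem.List.slice_natCast]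
  congr 1
  omega

-- the same, fused with an arbitrary per-chunk post-map F
theorem pv_range_chunks_map {α β : Type} (q : Nat) (t : List α) (ht : t.length = 8 * q)
    (F : List α → β) :
    (PySem.List.pyRange 0 (PySem.List.len t) 8).map
        (fun i => F (PySem.List.slice t (some i) (some (i+8))))
      = (pvChunks t).map F := by
  rw [← pv_range_chunks q t ht, List.map_map]
  rfl

theorem pvBits4 (a b c d : Char) (rest : List Char) :
    pvBits (a :: b :: c :: d :: rest)
      = bits8 (4*(pvIdx a) + (pvIdx b)/16) ++ bits8 (((pvIdx b)%16)*16 + (pvIdx c)/4)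
        ++ bits8 (((pvIdx c)%4)*64 + pvIdx d) ++ pvBits rest := by
  have ha := pvIdx_lt a; have hb := pvIdx_lt b; have hc := pvIdx_lt c; have hd := pvIdx_lt d
  simp only [pvBits, List.flatMap_cons, bits6, bits8, List.cons_append, List.nil_append]
  simp only [List.cons.injEq, and_true]
  omega

theorem pvTrunc_append8 {α : Type} (x y : List α) (hx : x.length % 8 = 0) :
    pvTrunc (x ++ y) = x ++ pvTrunc y := by
  unfold pvTrunc
  have h1 : (x ++ y).length = x.length + y.length := by simp
  rw [h1, show x.length + y.length - (x.length + y.length) % 8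
      = x.length + (y.length - y.length % 8) by omega]
  rw [List.take_append]
  congr 1
  · exact List.take_of_length_le (by omega)
  · congr 1; omega

theorem pvChunks_append8 {α : Type} (x r : List α) (hx : x.length = 8) :
    pvChunks (x ++ r) = x :: pvChunks r := by
  match x, hx with
  | [a1,a2,a3,a4,a5,a6,a7,a8], _ =>
    simp only [List.cons_append, List.nil_append]
    rw [pvChunks]
    simp

theorem pvTrunc_mod0 {α : Type} (t : List α) (h : t.length % 8 = 0) : pvTrunc t = t := by
  unfold pvTrunc; rw [h]; simp

theorem pvTrunc_small1 (a : Char) : pvTrunc (pvBits [a]) = [] := by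
  simp [pvBits, bits6, pvTrunc]

theorem pvTrunc_small2 (a b : Char) :
    pvTrunc (pvBits [a, b]) = bits8 (4*(pvIdx a) + (pvIdx b)/16) := by
  have ha := pvIdx_lt a; have hb := pvIdx_lt b
  simp [pvBits, bits6, bits8, pvTrunc, List.cons.injEq]
  omega

theorem pvTrunc_small3 (a b c : Char) :
    pvTrunc (pvBits [a, b, c])
      = bits8 (4*(pvIdx a) + (pvIdx b)/16) ++ bits8 (((pvIdx b)%16)*16 + (pvIdx c)/4) := by
  have ha := pvIdx_lt a; have hb := pvIdx_lt b; have hc := pvIdx_lt c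
  simp [pvBits, bits6, bits8, pvTrunc, List.cons.injEq]
  omega

theorem bits8_length (b : Nat) : (bits8 b).length = 8 := by simp [bits8]

theorem pv_A_main (cs : List Char) :
    (pvChunks (pvTrunc (pvBits cs))).map pvHexify = pvAspec cs := by
  induction cs using pvAspec.induct with
  | case1 a b c d rest ih =>
    have ha := pvIdx_lt a; have hb := pvIdx_lt b; have hc := pvIdx_lt c; have hd := pvIdx_lt d
    rw [pvBits4, List.append_assoc, List.append_assoc,
      pvTrunc_append8 _ _ (by simp [bits8_length]),
      pvTrunc_append8 _ _ (by simp [bits8_length]),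
      pvTrunc_append8 _ _ (by simp [bits8_length]),
      pvChunks_append8 _ _ (bits8_length _), pvChunks_append8 _ _ (bits8_length _),
      pvChunks_append8 _ _ (bits8_length _)]
    simp only [List.map_cons, ih, pvAspec]
    rw [pvHexify_bits8 _ (by omega), pvHexify_bits8 _ (by omega), pvHexify_bits8 _ (by omega)]
  | case2 => simp [pvBits, pvTrunc, pvChunks_nil, pvAspec]
  | case3 a => rw [pvTrunc_small1, pvChunks_nil]; rfl
  | case4 a b =>
    have ha := pvIdx_lt a; have hb := pvIdx_lt b
    rw [pvTrunc_small2, show bits8 (4*(pvIdx a) + (pvIdx b)/16)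
        = bits8 (4*(pvIdx a) + (pvIdx b)/16) ++ [] by simp,
      pvChunks_append8 _ _ (bits8_length _), pvChunks_nil]
    simp only [List.map_cons, List.map_nil, pvAspec]
    rw [pvHexify_bits8 _ (by omega)]
  | case5 a b c =>
    have ha := pvIdx_lt a; have hb := pvIdx_lt b; have hc := pvIdx_lt c
    rw [pvTrunc_small3, pvChunks_append8 _ _ (bits8_length _),
      show bits8 (((pvIdx b)%16)*16 + (pvIdx c)/4)
        = bits8 (((pvIdx b)%16)*16 + (pvIdx c)/4) ++ [] by simp,
      pvChunks_append8 _ _ (bits8_length _), pvChunks_nil]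
    simp only [List.map_cons, List.map_nil, pvAspec]
    rw [pvHexify_bits8 _ (by omega), pvHexify_bits8 _ (by omega)]

theorem pvOr6 (a v : Nat) (h : v < 64) : (a <<< 6) ||| v = 64*a + v := by
  have := Nat.shiftLeft_add_eq_or_of_lt (a := a) (b := v) (i := 6) h
  have h2 : a <<< 6 = 64 * a := by rw [Nat.shiftLeft_eq]; ring
  omega

theorem pvByte0 (x : Nat) : x &&& 255 = x % 256 := Nat.and_two_pow_sub_one_eq_mod x 8
theorem pvByte4 (x : Nat) : (x >>> 4) &&& 255 = x / 16 % 256 := by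
  rw [Nat.shiftRight_eq_div_pow, Nat.and_two_pow_sub_one_eq_mod _ 8]
theorem pvByte2 (x : Nat) : (x >>> 2) &&& 255 = x / 4 % 256 := by
  rw [Nat.shiftRight_eq_div_pow, Nat.and_two_pow_sub_one_eq_mod _ 8]
theorem pvMask4 (x : Nat) : x &&& (1 <<< 4 - 1) = x % 16 := by
  rw [show (1 <<< 4 - 1 : Nat) = 15 from rfl]
  exact Nat.and_two_pow_sub_one_eq_mod x 4
theorem pvMask2 (x : Nat) : x &&& (1 <<< 2 - 1) = x % 4 := by
  rw [show (1 <<< 2 - 1 : Nat) = 3 from rfl]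
  exact Nat.and_two_pow_sub_one_eq_mod x 2

theorem pv_B_main (cs : List Char) (acc : Nat) (out : List (List Char)) :
    (List.foldl pvBStep (acc, 0, out) cs).2.2 = out ++ pvAspec cs := by
  induction cs using pvAspec.induct generalizing acc out with
  | case1 a b c d rest ih =>
    have ha := pvIdx_lt a; have hb := pvIdx_lt b; have hc := pvIdx_lt c; have hd := pvIdx_lt d
    simp only [List.foldl_cons, pvBStep, pvOr6 _ _ ha]
    norm_num
    rw [pvOr6 _ _ hb, pvMask4, pvByte4]
    rw [pvOr6 _ _ hc, pvMask2, pvByte2]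
    rw [pvOr6 _ _ hd, pvByte0, ih]
    simp only [pvAspec, List.append_assoc, List.cons_append, List.nil_append,
      List.append_cancel_left_eq, List.cons.injEq, and_true]
    refine ⟨congrArg pvHex2 (by omega), congrArg pvHex2 (by omega), congrArg pvHex2 (by omega)⟩
  | case2 => simp [pvAspec]
  | case3 a => simp [pvBStep, pvAspec]
  | case4 a b =>
    have ha := pvIdx_lt a; have hb := pvIdx_lt b
    simp only [List.foldl_cons, pvBStep, List.foldl_nil]
    norm_num
    rw [pvOr6 _ _ ha, pvOr6 _ _ hb, pvByte4]
    simp only [pvAspec, List.cons.injEq, and_true]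
    exact congrArg pvHex2 (by omega)
  | case5 a b c =>
    have ha := pvIdx_lt a; have hb := pvIdx_lt b; have hc := pvIdx_lt c
    simp only [List.foldl_cons, pvBStep, List.foldl_nil]
    norm_num
    rw [pvOr6 _ _ ha, pvOr6 _ _ hb, pvMask4, pvByte4]
    rw [pvOr6 _ _ hc, pvByte2]
    simp only [pvAspec, List.cons.injEq, and_true]
    refine ⟨congrArg pvHex2 (by omega), congrArg pvHex2 (by omega)⟩

theorem pvTrunc_map {α β : Type} (f : α → β) (l : List α) :
    pvTrunc (l.map f) = (pvTrunc l).map f := by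
  simp [pvTrunc, List.map_take]

theorem pvChunks_map {α β : Type} (f : α → β) (l : List α) :
    pvChunks (l.map f) = (pvChunks l).map (List.map f) := by
  induction l using pvChunks.induct with
  | case1 => simp [pvChunks_nil]
  | case2 x xs ih =>
    show pvChunks (f x :: List.map f xs) = _
    rw [pvChunks]
    conv_rhs => rw [pvChunks]
    simp only [List.map_cons, List.cons.injEq]
    constructor
    · show (List.map f (x::xs)).take 8 = List.map f ((x::xs).take 8)
      simp [List.map_take]
    · show pvChunks ((List.map f (x::xs)).drop 8) = List.map (List.map f) (pvChunks ((x::xs).drop 8))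
      rw [show (List.map f (x::xs)).drop 8 = List.map f ((x::xs).drop 8) by simp [List.map_drop]]
      exact ih

theorem pvTrunc_length {α : Type} (t : List α) :
    (pvTrunc t).length = 8 * (t.length / 8) := by
  simp only [pvTrunc, List.length_take]
  set n := t.length
  omega

theorem pv_mod_eq (t : List Char) :
    PySem.Int.mod (PySem.List.len t) 8 = ((t.length % 8 : Nat) : Int) := by
  unfold PySem.Int.mod
  rw [Int.fmod_eq_emod]
  simp only [PySem.List.len_eq]
  rw [if_pos (Or.inl (by norm_num))]
  push_cast
  omega

-- ===== VERDICT (by name: the statement is the Claim_ definition above) =====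
theorem custom_b64_to_hex_spec : Claim_equal_custom_b64_to_hex := by
  unfold Claim_equal_custom_b64_to_hex
  intro s _ _
  unfold Spec_custom_b64_to_hex custom_b64_to_hex custom_b64_to_hex_alt
  simp only []
  set cs := pvRstripEq s.toList with hcs
  rw [pv_binary_eq cs, pv_mod_eq]
  have hbin2 : (if (((((pvBits cs).map bitChar).length % 8 : Nat) : Int) ≠ 0)
      then PySem.Chars.slice ((pvBits cs).map bitChar) none (some (-((((pvBits cs).map bitChar).length % 8 : Nat) : Int)))
      else (pvBits cs).map bitChar) = pvTrunc ((pvBits cs).map bitChar) := by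
    set t := (pvBits cs).map bitChar with ht
    by_cases h : t.length % 8 = 0
    · rw [if_neg (by simp [h]), pvTrunc_mod0 t h]
    · rw [if_pos (by exact_mod_cast h)]
      have := PySem.List.slice_to_neg_natCast (xs := t) (k := t.length % 8) (Nat.pos_of_ne_zero h)
      simpa [pvTrunc, PySem.Chars.slice_eq_listSlice] using this
  rw [hbin2, pvTrunc_map]
  simp only [PySem.Chars.slice_eq_listSlice]
  rw [pv_range_chunks_map ((pvBits cs).length / 8) (List.map bitChar (pvTrunc (pvBits cs)))
    (by simp only [List.length_map, pvTrunc_length])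
    (fun chunk => PySem.Chars.zfill (PySem.List.slice
      (custom_hex ((PySem.Int.ofCharsBase? chunk 2).getD 0)) (some 2) none) 2)]
  rw [pvChunks_map, List.map_map]
  rw [show ((fun (chunk : List Char) => PySem.Chars.zfill (PySem.List.slice
        (custom_hex ((PySem.Int.ofCharsBase? chunk 2).getD 0)) (some 2) none) 2) ∘ List.map bitChar)
      = pvHexify from by funext ds; simp [pvHexify]]
  rw [pv_A_main, pv_B_main]
  simp
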